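-- pv_equiv track=rewrite | github.com/afodo92/eduard-repo11 | scripts/run_zephyr_automation_cycle.py | __build_pass_fail_summary
-- ===== SOURCE A (Python) =====
-- def __build_pass_fail_summary(update_data):
--     pass_count = 0
--     fail_count = 0
--     indeterminate_count = 0
--     for test_key, test_data in update_data.items():
--         if test_data["result"] is not None and test_data["result"].lower() == "pass":
--             pass_count += 1
--             continue
--         if test_data["result"] is not None and test_data["result"].lower() == "fail":
--             fail_count += 1
--             continue
--         indeterminate_count += 1
--
--     return {"pass": pass_count, "fail": fail_count, "indeterminate": indeterminate_count,
--             "total": pass_count + fail_count + indeterminate_count}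
-- ===== SOURCE B (Python) =====
-- def __build_pass_fail_summary(update_data):
--     pass_count = sum(1 for td in update_data.values()
--                      if td["result"] is not None and td["result"].lower() == "pass")
--     fail_count = sum(1 for td in update_data.values()
--                      if td["result"] is not None and td["result"].lower() == "fail")
--     total = len(update_data)
--     return {"pass": pass_count, "fail": fail_count,
--             "indeterminate": total - pass_count - fail_count, "total": total}
-- ===== Notes on version B (the rewrite author's own statement) =====
-- stated objective: alternative
-- what changed: Replaces the single interleaved counting loop with continues by two independent generator-expression sums for pass and fail, deriving the indeterminate count arithmetically as len(update_data) - pass - fail.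
import Mathlib
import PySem

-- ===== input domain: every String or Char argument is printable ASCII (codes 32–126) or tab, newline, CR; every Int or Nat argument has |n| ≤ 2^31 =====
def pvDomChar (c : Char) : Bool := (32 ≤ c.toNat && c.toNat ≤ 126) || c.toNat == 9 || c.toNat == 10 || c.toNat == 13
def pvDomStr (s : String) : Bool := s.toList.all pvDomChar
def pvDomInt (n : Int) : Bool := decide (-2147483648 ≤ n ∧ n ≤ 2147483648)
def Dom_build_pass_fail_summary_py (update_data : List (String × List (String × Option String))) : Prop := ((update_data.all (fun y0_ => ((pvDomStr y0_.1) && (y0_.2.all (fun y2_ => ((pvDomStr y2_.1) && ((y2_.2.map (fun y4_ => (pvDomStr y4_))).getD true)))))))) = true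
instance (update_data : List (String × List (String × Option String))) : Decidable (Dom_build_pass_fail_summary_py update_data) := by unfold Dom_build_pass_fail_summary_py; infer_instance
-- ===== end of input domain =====

-- ===== PORT A =====
-- B restructures A's single interleaved counting loop into two independent counts plus arithmetic (objective: alternative decomposition).
-- Shared helper: the Python expression test_data["result"] (first-match lookup; Pre_ guarantees the key is present).
def pvRes (td : List (String × Option String)) : Option String :=
  ((td.find? (fun q => q.1 == "result")).map Prod.snd).getD none

def build_pass_fail_summary_py (update_data : List (String × List (String × Option String))) : List (String × Int) :=
  let acc := update_data.foldl (fun (acc : Int × Int × Int) kv =>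
    match pvRes kv.2 with
    | some s =>
      if PySem.Str.lower s == "pass" then (acc.1 + 1, acc.2.1, acc.2.2)
      else if PySem.Str.lower s == "fail" then (acc.1, acc.2.1 + 1, acc.2.2)
      else (acc.1, acc.2.1, acc.2.2 + 1)
    | none => (acc.1, acc.2.1, acc.2.2 + 1)) (0, 0, 0)
  [("pass", acc.1), ("fail", acc.2.1), ("indeterminate", acc.2.2),
   ("total", acc.1 + acc.2.1 + acc.2.2)]

-- ===== PORT B =====
def pvIsRes (lbl : String) (td : List (String × Option String)) : Bool :=
  match pvRes td with
  | some s => PySem.Str.lower s == lbl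
  | none => false

def build_pass_fail_summary_py_alt (update_data : List (String × List (String × Option String))) : List (String × Int) :=
  let p : Int := update_data.countP (fun kv => pvIsRes "pass" kv.2)
  let f : Int := update_data.countP (fun kv => pvIsRes "fail" kv.2)
  let t : Int := update_data.length
  [("pass", p), ("fail", f), ("indeterminate", t - p - f), ("total", t)]

-- ===== PRECONDITION & SPEC =====
-- Pre_ excludes only inputs where Python A raises KeyError: some test dict has no "result" key.
def Pre_build_pass_fail_summary_py (update_data : List (String × List (String × Option String))) : Prop :=
  ∀ kv ∈ update_data, "result" ∈ kv.2.map Prod.fst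
instance (update_data : List (String × List (String × Option String))) : Decidable (Pre_build_pass_fail_summary_py update_data) := by unfold Pre_build_pass_fail_summary_py; infer_instance

def pvWitness_build_pass_fail_summary_py : (List (String × List (String × Option String))) :=
  [("t1", [("result", some "Pass")]), ("t2", [("result", none)])]

def Spec_build_pass_fail_summary_py (update_data : List (String × List (String × Option String))) (out : List (String × Int)) : Prop := out = build_pass_fail_summary_py_alt update_data
instance (update_data : List (String × List (String × Option String))) (out : List (String × Int)) : Decidable (Spec_build_pass_fail_summary_py update_data out) := by unfold Spec_build_pass_fail_summary_py; infer_instance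

-- ===== CLAIM (what is proved, stated in full; the proofs are below) =====
def Claim_equal_build_pass_fail_summary_py : Prop := ∀ (update_data : List (String × List (String × Option String))), Dom_build_pass_fail_summary_py update_data → Pre_build_pass_fail_summary_py update_data → Spec_build_pass_fail_summary_py update_data (build_pass_fail_summary_py update_data)

-- ===== LEMMAS AND PROOFS =====
def pvStep (acc : Int × Int × Int) (kv : String × List (String × Option String)) : Int × Int × Int :=
  match pvRes kv.2 with
  | some s =>
    if PySem.Str.lower s == "pass" then (acc.1 + 1, acc.2.1, acc.2.2)
    else if PySem.Str.lower s == "fail" then (acc.1, acc.2.1 + 1, acc.2.2)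
    else (acc.1, acc.2.1, acc.2.2 + 1)
  | none => (acc.1, acc.2.1, acc.2.2 + 1)

theorem pv_fold_inv (ud : List (String × List (String × Option String))) :
    ∀ (p f i : Int), ud.foldl pvStep (p, f, i) =
      (p + ud.countP (fun kv => pvIsRes "pass" kv.2),
       f + ud.countP (fun kv => pvIsRes "fail" kv.2),
       i + ud.countP (fun kv => !(pvIsRes "pass" kv.2) && !(pvIsRes "fail" kv.2))) := by
  induction ud with
  | nil => intro p f i; simp
  | cons kv tl ih =>
    intro p f i
    rw [List.foldl_cons]
    cases h : pvRes kv.2 with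
    | none =>
      have hstep : pvStep (p, f, i) kv = (p, f, i + 1) := by simp [pvStep, h]
      have hP : pvIsRes "pass" kv.2 = false := by simp [pvIsRes, h]
      have hF : pvIsRes "fail" kv.2 = false := by simp [pvIsRes, h]
      rw [hstep, ih]
      simp only [List.countP_cons, hP, hF, Bool.not_false, Bool.and_self, if_true,
        Prod.mk.injEq]
      refine ⟨by push_cast; ring, by push_cast; ring, by push_cast; ring⟩
    | some s =>
      by_cases hp : PySem.Str.lower s = "pass"
      · have hstep : pvStep (p, f, i) kv = (p + 1, f, i) := by simp [pvStep, h, hp]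
        have hP : pvIsRes "pass" kv.2 = true := by simp [pvIsRes, h, hp]
        have hF : pvIsRes "fail" kv.2 = false := by simp [pvIsRes, h, hp]
        rw [hstep, ih]
        simp only [List.countP_cons, hP, hF, Bool.not_true, Bool.not_false, Bool.false_and,
          if_true, Prod.mk.injEq]
        refine ⟨by push_cast; ring, by push_cast; ring, by push_cast; ring⟩
      · by_cases hf : PySem.Str.lower s = "fail"
        · have hstep : pvStep (p, f, i) kv = (p, f + 1, i) := by simp [pvStep, h, hf]
          have hP : pvIsRes "pass" kv.2 = false := by simp [pvIsRes, h, hp]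
          have hF : pvIsRes "fail" kv.2 = true := by simp [pvIsRes, h, hf]
          rw [hstep, ih]
          simp only [List.countP_cons, hP, hF, Bool.not_true, Bool.not_false, Bool.and_false,
            if_true, Prod.mk.injEq]
          refine ⟨by push_cast; ring, by push_cast; ring, by push_cast; ring⟩
        · have hstep : pvStep (p, f, i) kv = (p, f, i + 1) := by simp [pvStep, h, hp, hf]
          have hP : pvIsRes "pass" kv.2 = false := by simp [pvIsRes, h, hp]
          have hF : pvIsRes "fail" kv.2 = false := by simp [pvIsRes, h, hf]
          rw [hstep, ih]
          simp only [List.countP_cons, hP, hF, Bool.not_false, Bool.and_self, if_true,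
            Prod.mk.injEq]
          refine ⟨by push_cast; ring, by push_cast; ring, by push_cast; ring⟩

theorem pv_count_total (ud : List (String × List (String × Option String))) :
    ud.countP (fun kv => pvIsRes "pass" kv.2) + ud.countP (fun kv => pvIsRes "fail" kv.2) +
      ud.countP (fun kv => !(pvIsRes "pass" kv.2) && !(pvIsRes "fail" kv.2)) = ud.length := by
  induction ud with
  | nil => simp
  | cons kv tl ih =>
    simp only [List.countP_cons, List.length_cons]
    by_cases hp : pvIsRes "pass" kv.2
    · have hf : pvIsRes "fail" kv.2 = false := by
        unfold pvIsRes at hp ⊢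
        cases h : pvRes kv.2 with
        | none => rfl
        | some s =>
          simp only [h] at hp ⊢
          cases hq : (PySem.Str.lower s == "fail")
          · rfl
          · exfalso
            have := eq_of_beq hp; have := eq_of_beq hq
            simp_all
      simp [hp, hf]; omega
    · simp only [Bool.not_eq_true] at hp
      by_cases hf : pvIsRes "fail" kv.2
      · simp [hp, hf]; omega
      · simp only [Bool.not_eq_true] at hf
        simp [hp, hf]; omega

-- ===== VERDICT (by name: the statement is the Claim_ definition above) =====
theorem build_pass_fail_summary_py_spec : Claim_equal_build_pass_fail_summary_py := by
  intro ud _ _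
  unfold Spec_build_pass_fail_summary_py build_pass_fail_summary_py build_pass_fail_summary_py_alt
  have hfold : ud.foldl (fun (acc : Int × Int × Int) kv =>
      match pvRes kv.2 with
      | some s =>
        if PySem.Str.lower s == "pass" then (acc.1 + 1, acc.2.1, acc.2.2)
        else if PySem.Str.lower s == "fail" then (acc.1, acc.2.1 + 1, acc.2.2)
        else (acc.1, acc.2.1, acc.2.2 + 1)
      | none => (acc.1, acc.2.1, acc.2.2 + 1)) (0, 0, 0) = ud.foldl pvStep (0, 0, 0) := rfl
  rw [hfold, pv_fold_inv]
  have htot := pv_count_total ud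
  simp only [zero_add, List.cons.injEq, Prod.mk.injEq, and_true, true_and]
  exact ⟨by omega, by omega⟩
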